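-- pv_equiv track=rewrite | github.com/AcademySoftwareFoundation/rez | src/rez/utils/formatting.py | columnise
-- ===== SOURCE A (Python) =====
-- def columnise(rows, padding=2):
--     """Print rows of entries in aligned columns."""
--     strs = []
--     maxwidths = {}
--
--     for row in rows:
--         for i, e in enumerate(row):
--             se = str(e)
--             nse = len(se)
--             w = maxwidths.get(i, -1)
--             if nse > w:
--                 maxwidths[i] = nse
--
--     for row in rows:
--         s = ''
--         for i, e in enumerate(row):
--             se = str(e)
--             if i < len(row) - 1:
--                 n = maxwidths[i] + padding - len(se)
--                 se += ' ' * n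
--             s += se
--         strs.append(s)
--     return strs
-- ===== SOURCE B (Python) =====
-- def columnise(rows, padding=2):
--     """Print rows of entries in aligned columns."""
--     cells = [[str(e) for e in row] for row in rows]
--     ncols = max(map(len, cells), default=0)
--     cols = [[] for _ in range(ncols)]
--     for j, r in enumerate(cells):
--         for i, se in enumerate(r):
--             cols[i].append((j, se))
--     parts = [[] for _ in cells]
--     for i, col in enumerate(cols):
--         width = max(len(se) for _, se in col)
--         for j, se in col:
--             parts[j].append(se if i == len(cells[j]) - 1 else se.ljust(width + padding))
--     return [''.join(p) for p in parts]
-- ===== Notes on version B (the rewrite author's own statement) =====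
-- stated objective: alternative
-- what changed: B builds the output column by column: it bucket-transposes the cells into per-column lists of (row index, cell), then for each column computes its width and appends the padded (or, for a row's last cell, bare) cell to that row's piece list, joining the pieces at the end - instead of A's two row-major passes (a running-max width dict, then per-row line assembly).
import Mathlib
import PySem

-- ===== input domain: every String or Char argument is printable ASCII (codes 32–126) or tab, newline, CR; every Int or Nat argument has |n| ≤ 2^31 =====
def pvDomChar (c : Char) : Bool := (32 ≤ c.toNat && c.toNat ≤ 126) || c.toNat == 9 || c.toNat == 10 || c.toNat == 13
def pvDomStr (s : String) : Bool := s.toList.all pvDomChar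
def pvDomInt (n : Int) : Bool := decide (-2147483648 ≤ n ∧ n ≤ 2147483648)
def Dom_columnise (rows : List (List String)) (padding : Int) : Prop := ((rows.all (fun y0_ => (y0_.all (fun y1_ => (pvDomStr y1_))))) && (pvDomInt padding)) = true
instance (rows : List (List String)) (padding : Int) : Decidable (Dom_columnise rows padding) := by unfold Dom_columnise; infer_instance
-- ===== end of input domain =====

-- B is column-major: it bucket-transposes the cells into columns, then emits each column in turn,
-- appending each cell (padded, or bare for a row's last cell) to its row's piece list; objective: alternative.

-- ===== PORT A =====
def columnise (rows : List (List String)) (padding : Int) : List String :=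
  let maxwidths : PySem.Dict Int Int :=
    rows.foldl (fun mw row =>
      (PySem.List.enumerate row).foldl (fun mw ie =>
        let nse := PySem.Str.len ie.2
        let w := mw.getD ie.1 (-1)
        if nse > w then mw.insert ie.1 nse else mw) mw) PySem.Dict.empty
  rows.foldl (fun strs row =>
    let s := (PySem.List.enumerate row).foldl (fun s ie =>
      let se := ie.2
      -- maxwidths[i]: the key is always present here (column i of this row exists), so the
      -- raising lookup is ported as getD with an unreachable default
      let se := if ie.1 < PySem.List.len row - 1 then
          se ++ String.ofList (PySem.List.pyRepeat [' '] (maxwidths.getD ie.1 0 + padding - PySem.Str.len se))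
        else se
      s ++ se) ""
    strs ++ [s]) []

-- ===== PORT B =====
-- str.ljust(w): pad on the right with spaces to width w (no pad when w ≤ len)
def pyLjust (s : String) (w : Int) : String :=
  s ++ String.ofList (List.replicate (w - PySem.Str.len s).toNat ' ')

def columnise_alt (rows : List (List String)) (padding : Int) : List String :=
  let cells := rows.map (fun row => row.map (fun e => e))
  let ncols : Int := PySem.List.maxD (cells.map (fun r => PySem.List.len r)) (fun x => x) 0
  let cols0 : List (List (Int × String)) := (PySem.List.pyRange 0 ncols 1).map (fun _ => [])
  let cols := (PySem.List.enumerate cells).foldl (fun cols jr =>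
    (PySem.List.enumerate jr.2).foldl (fun cols ise =>
      PySem.List.pySetD cols ise.1 (PySem.List.pyGetD cols ise.1 [] ++ [(jr.1, ise.2)])) cols) cols0
  let parts0 : List (List String) := cells.map (fun _ => [])
  let parts := (PySem.List.enumerate cols).foldl (fun parts icol =>
    -- max(...) without default: every col reached here is nonempty (some row has that column),
    -- so the raising max is ported as maxD with an unreachable default
    let width := PySem.List.maxD (icol.2.map (fun js => PySem.Str.len js.2)) (fun x => x) 0
    icol.2.foldl (fun parts js =>
      PySem.List.pySetD parts js.1 (PySem.List.pyGetD parts js.1 [] ++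
        [if icol.1 = PySem.List.len (PySem.List.pyGetD cells js.1 []) - 1 then js.2
         else pyLjust js.2 (width + padding)])) parts) parts0
  parts.map (fun p => PySem.Str.join "" p)

-- ===== PRECONDITION & SPEC =====
def Spec_columnise (rows : List (List String)) (padding : Int) (out : List String) : Prop := out = columnise_alt rows padding
instance (rows : List (List String)) (padding : Int) (out : List String) : Decidable (Spec_columnise rows padding out) := by unfold Spec_columnise; infer_instance

-- ===== CLAIM (what is proved, stated in full; the proofs are below) =====
def Claim_equal_columnise : Prop := ∀ (rows : List (List String)) (padding : Int), Dom_columnise rows padding → Spec_columnise rows padding (columnise rows padding)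

-- ===== LEMMAS AND PROOFS =====

-- structured views of the A port
def pvStep (mw : PySem.Dict Int Int) (ie : Int × String) : PySem.Dict Int Int :=
  let nse := PySem.Str.len ie.2
  let w := mw.getD ie.1 (-1)
  if nse > w then mw.insert ie.1 nse else mw

def pvDict (rows : List (List String)) : PySem.Dict Int Int :=
  rows.foldl (fun mw row => (PySem.List.enumerate row).foldl pvStep mw) PySem.Dict.empty

def pvPieceA (mw : PySem.Dict Int Int) (padding : Int) (row : List String) (ie : Int × String) : String :=
  if ie.1 < PySem.List.len row - 1 then
    ie.2 ++ String.ofList (PySem.List.pyRepeat [' '] (mw.getD ie.1 0 + padding - PySem.Str.len ie.2))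
  else ie.2

-- structured views of the B port
def pvNcols (rows : List (List String)) : Int :=
  PySem.List.maxD (rows.map (fun row => PySem.List.len row)) (fun x => x) 0

def pvColList (rows : List (List String)) (i : Int) : List Int :=
  (rows.filter (fun row => decide (i < PySem.List.len row))).map
    (fun row => PySem.Str.len ((PySem.List.pyGet? row i).getD ""))

def pvColW (rows : List (List String)) (i : Int) : Int :=
  PySem.List.maxD (pvColList rows i) (fun x => x) 0

def pvG (rows : List (List String)) (padding : Int) (row : List String) (i : Int) : String :=
  if i < PySem.List.len row - 1 then pyLjust ((PySem.List.pyGet? row i).getD "") (pvColW rows i + padding)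
  else if i = PySem.List.len row - 1 then (PySem.List.pyGet? row i).getD ""
  else ""

def pvCat (rows : List (List String)) (padding : Int) (row : List String) (k : Int) : String :=
  PySem.Str.join "" ((PySem.List.pyRange 0 k 1).map (pvG rows padding row))

lemma columnise_eq (rows : List (List String)) (padding : Int) :
    columnise rows padding =
      rows.foldl (fun strs row =>
        strs ++ [(PySem.List.enumerate row).foldl (fun s ie => s ++ pvPieceA (pvDict rows) padding row ie) ""]) [] := rfl

-- ''.join as string concatenation
lemma join_empty_cons (a : String) (l : List String) :
    PySem.Str.join "" (a :: l) = a ++ PySem.Str.join "" l := by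
  apply String.toList_inj.mp
  cases l with
  | nil => simp [PySem.Str.join, PySem.Chars.join_singleton, PySem.Chars.join_nil]
  | cons b t => simp [PySem.Str.join, PySem.Chars.join_cons_cons]

lemma foldl_str_append {α : Type} (l : List α) (g : α → String) (init : String) :
    l.foldl (fun s x => s ++ g x) init = init ++ PySem.Str.join "" (l.map g) := by
  induction l generalizing init with
  | nil =>
    apply String.toList_inj.mp
    simp [PySem.Str.join, PySem.Chars.join_nil]
  | cons x t ih =>
    simp only [List.foldl_cons, List.map_cons, ih, join_empty_cons, String.append_assoc]

-- characterisation of A's width dict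
lemma inner_lt (row : List String) : ∀ (s : Int) (d : PySem.Dict Int Int) (k : Int), k < s →
    (((PySem.List.enumerate row s).foldl pvStep d).get? k) = d.get? k := by
  induction row with
  | nil => intro s d k _; simp [PySem.List.enumerate_nil]
  | cons x t ih =>
    intro s d k hk
    rw [PySem.List.enumerate_cons, List.foldl_cons, ih (s+1) _ k (by omega)]
    simp only [pvStep]
    split
    · rw [PySem.Dict.get?_insert]
      simp only [if_neg (by omega : ¬ k = s)]
    · rfl

lemma inner_get? (row : List String) : ∀ (s : Int) (d : PySem.Dict Int Int) (j : Nat),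
    (((PySem.List.enumerate row s).foldl pvStep d).get? (s + j)) =
      match row[j]? with
      | none => d.get? (s + j)
      | some e => some (max ((d.get? (s + j)).getD (-1)) (PySem.Str.len e)) := by
  induction row with
  | nil => intro s d j; simp [PySem.List.enumerate_nil]
  | cons x t ih =>
    intro s d j
    rw [PySem.List.enumerate_cons, List.foldl_cons]
    cases j with
    | zero =>
      rw [show s + (0:Nat) = s by omega]
      rw [inner_lt t (s+1) _ s (by omega)]
      simp only [List.getElem?_cons_zero, pvStep, PySem.Dict.getD_eq_get?_getD]
      split
      · rename_i h
        rw [PySem.Dict.get?_insert]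
        simp only [reduceIte]
        exact congrArg some (max_eq_right (le_of_lt h)).symm
      · rename_i h
        cases h' : (d.get? s) with
        | none =>
          exfalso
          rw [h'] at h
          have : (0:Int) ≤ PySem.Str.len x := by simp [PySem.Str.len_eq]
          simp only [Option.getD_none] at h
          omega
        | some v =>
          simp only [h', Option.getD_some] at h ⊢
          exact congrArg some (max_eq_left (by omega)).symm
    | succ j' =>
      rw [show s + ((j'+1:Nat):Int) = (s+1) + j' by push_cast; omega]
      rw [ih (s+1)]
      have hd' : (if PySem.Str.len x > d.getD s (-1) then d.insert s (PySem.Str.len x) else d).get? (s+1+(j':Int)) = d.get? (s+1+(j':Int)) := by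
        split
        · rw [PySem.Dict.get?_insert]
          exact if_neg (by omega)
        · rfl
      simp only [pvStep, hd', List.getElem?_cons_succ]

lemma outer_get? (rows : List (List String)) : ∀ (d : PySem.Dict Int Int) (j : Nat),
    ((rows.foldl (fun mw row => (PySem.List.enumerate row).foldl pvStep mw) d).get? (j : Int)) =
      rows.foldl (fun o row =>
        match row[j]? with
        | none => o
        | some e => some (max (o.getD (-1)) (PySem.Str.len e))) (d.get? (j : Int)) := by
  induction rows with
  | nil => intro d j; simp
  | cons r rest ih =>
    intro d j
    simp only [List.foldl_cons]
    rw [ih]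
    have h0 : ((PySem.List.enumerate r).foldl pvStep d).get? (j : Int) =
        match r[j]? with
        | none => d.get? (j : Int)
        | some e => some (max ((d.get? (j : Int)).getD (-1)) (PySem.Str.len e)) := by
      have := inner_get? r 0 d j
      rw [show (0:Int) + (j:Int) = (j:Int) by omega] at this
      exact this
    rw [h0]

lemma rowsfold_eq_colfold (rows : List (List String)) (j : Nat) : ∀ (init : Option Int),
    rows.foldl (fun o row =>
        match row[j]? with
        | none => o
        | some e => some (max (o.getD (-1)) (PySem.Str.len e))) init =
      (pvColList rows (j : Int)).foldl (fun o v => some (max (o.getD (-1)) v)) init := by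
  induction rows with
  | nil => intro init; simp [pvColList]
  | cons r rest ih =>
    intro init
    simp only [List.foldl_cons, pvColList, List.filter_cons]
    cases hj : r[j]? with
    | none =>
      have hlt : ¬ ((j:Int) < PySem.List.len r) := by
        simp only [PySem.List.len_eq]
        have := List.getElem?_eq_none_iff.mp hj
        omega
      simp only [decide_eq_true_eq, if_neg hlt]
      exact ih init
    | some e =>
      obtain ⟨hjl, -⟩ := List.getElem?_eq_some_iff.mp hj
      have hlt : ((j:Int) < PySem.List.len r) := by
        simp only [PySem.List.len_eq]; omega
      simp only [decide_eq_true_eq, if_pos hlt, List.map_cons, List.foldl_cons]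
      rw [ih]
      congr 2
      rw [PySem.List.pyGet?_natCast, hj]
      rfl

lemma optfold_some (t : List Int) : ∀ (a : Int),
    t.foldl (fun o v => some (max (o.getD (-1)) v)) (some a) = some (t.foldl max a) := by
  induction t with
  | nil => intro a; rfl
  | cons x r ih => intro a; simp only [List.foldl_cons, Option.getD_some, ih]

lemma colList_nonneg (rows : List (List String)) (i : Int) : ∀ x ∈ pvColList rows i, 0 ≤ x := by
  intro x hx
  simp only [pvColList, List.mem_map] at hx
  obtain ⟨r, _, hr⟩ := hx
  rw [← hr]
  simp [PySem.Str.len_eq]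

lemma mem_colList (rows : List (List String)) (j : Nat) (row : List String)
    (hr : row ∈ rows) (hj : j < row.length) :
    PySem.Str.len row[j] ∈ pvColList rows (j : Int) := by
  simp only [pvColList, List.mem_map]
  refine ⟨row, ?_, ?_⟩
  · rw [List.mem_filter]
    exact ⟨hr, by simp only [PySem.List.len_eq, decide_eq_true_eq]; omega⟩
  · rw [PySem.List.pyGet?_natCast, List.getElem?_eq_getElem hj]
    rfl

lemma le_ncols (rows : List (List String)) (row : List String) (hr : row ∈ rows) :
    PySem.List.len row ≤ pvNcols rows := by
  unfold pvNcols PySem.List.maxD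
  cases hm : PySem.List.max? (rows.map (fun row => PySem.List.len row)) (fun x => x) with
  | none =>
    rw [PySem.List.max?_eq_none_iff] at hm
    exact absurd (List.map_eq_nil_iff.mp hm) (List.ne_nil_of_mem hr)
  | some m =>
    have hle := PySem.List.max?_isMax hm (PySem.List.len row) (List.mem_map_of_mem hr)
    simp only [Option.getD_some]
    exact hle

lemma width_agree (rows : List (List String)) (row : List String) (hr : row ∈ rows) (j : Nat)
    (hj : j < row.length) :
    (pvDict rows).getD (j : Int) 0 = pvColW rows (j : Int) := by
  have hmem := mem_colList rows j row hr hj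
  cases hL : pvColList rows (j : Int) with
  | nil => rw [hL] at hmem; exact absurd hmem (List.not_mem_nil)
  | cons x t =>
    have hx0 : (0 : Int) ≤ x := by
      have := colList_nonneg rows (j : Int) x (by rw [hL]; exact List.mem_cons_self)
      omega
    have hL' : (pvDict rows).get? (j : Int) = some (t.foldl max x) := by
      unfold pvDict
      rw [outer_get? rows PySem.Dict.empty j, PySem.Dict.get?_empty,
        rowsfold_eq_colfold rows j none, hL, List.foldl_cons]
      have : max ((none : Option Int).getD (-1)) x = x := by
        simp only [Option.getD_none]; omega
      rw [this, optfold_some]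
    rw [PySem.Dict.getD_eq_get?_getD, hL']
    unfold pvColW
    rw [hL]
    unfold PySem.List.maxD
    rw [PySem.List.max?_id_cons]

-- structured views of the B port
def pvColStep (rows : List (List String)) (padding : Int) (parts : List (List String))
    (icol : Int × List (Int × String)) : List (List String) :=
  let width := PySem.List.maxD (icol.2.map (fun js => PySem.Str.len js.2)) (fun x => x) 0
  icol.2.foldl (fun parts js =>
    PySem.List.pySetD parts js.1 (PySem.List.pyGetD parts js.1 [] ++
      [if icol.1 = PySem.List.len (PySem.List.pyGetD rows js.1 []) - 1 then js.2
       else pyLjust js.2 (width + padding)])) parts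

def pvBucket : List (List String) → Nat → Nat → List (Int × String)
  | [], _, _ => []
  | r :: rs, s, n => (if n < r.length then [((s:Int), r.getD n "")] else []) ++ pvBucket rs (s+1) n

lemma columnise_alt_eq (rows : List (List String)) (padding : Int) :
    columnise_alt rows padding =
      ((PySem.List.enumerate
        ((PySem.List.enumerate rows).foldl (fun cols jr =>
          (PySem.List.enumerate jr.2).foldl (fun cols ise =>
            PySem.List.pySetD cols ise.1 (PySem.List.pyGetD cols ise.1 [] ++ [(jr.1, ise.2)])) cols)
          ((PySem.List.pyRange 0 (pvNcols rows) 1).map (fun _ => [])))).foldl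
        (pvColStep rows padding) (rows.map (fun _ => []))).map (fun p => PySem.Str.join "" p) := by
  simp only [columnise_alt, List.map_id', pvNcols]
  rfl

-- the inner row pass appends (j, cell) to each touched column bucket
lemma inner_cols (j : Int) (r : List String) : ∀ (s : Nat) (L : List (List (Int × String))),
    (PySem.List.enumerate r (s:Int)).foldl (fun cols ise =>
        PySem.List.pySetD cols ise.1 (PySem.List.pyGetD cols ise.1 [] ++ [(j, ise.2)])) L =
      L.mapIdx (fun n a => if s ≤ n ∧ n < s + r.length then a ++ [(j, r.getD (n - s) "")] else a) := by
  induction r with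
  | nil =>
    intro s L
    rw [PySem.List.enumerate_nil, List.foldl_nil]
    apply List.ext_getElem (by simp)
    intro n h1 h2
    rw [List.getElem_mapIdx, if_neg (by simp only [List.length_nil]; omega)]
  | cons x t ih =>
    intro s L
    rw [PySem.List.enumerate_cons, List.foldl_cons]
    have hcast : (s:Int) + 1 = ((s+1:Nat):Int) := by push_cast; ring
    rw [hcast]
    have hset : PySem.List.pySetD L (s:Int) (PySem.List.pyGetD L (s:Int) [] ++ [(j, x)]) =
        L.set s (L.getD s [] ++ [(j, x)]) := by simp
    rw [hset, ih (s+1)]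
    apply List.ext_getElem (by simp)
    intro n h1 h2
    rw [List.getElem_mapIdx, List.getElem_mapIdx, List.getElem_set]
    have hn : n < L.length := by simpa using h2
    by_cases hns : s = n
    · subst hns
      rw [if_neg (by omega),
        if_pos (show s ≤ s ∧ s < s + (x :: t).length by simp only [List.length_cons]; omega)]
      simp [List.getD_eq_getElem?_getD, List.getElem?_eq_getElem hn]
    · rw [if_neg hns]
      by_cases hin : s + 1 ≤ n ∧ n < s + 1 + t.length
      · rw [if_pos hin, if_pos (by simp only [List.length_cons]; omega)]
        have : n - s = (n - (s+1)) + 1 := by omega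
        rw [this, List.getD_cons_succ]
      · rw [if_neg hin, if_neg (by simp only [List.length_cons]; omega)]

-- the full transposition pass: bucket n collects (row index, cell) of every row with column n
lemma outer_cols (rows' : List (List String)) : ∀ (s : Nat) (L : List (List (Int × String))),
    (PySem.List.enumerate rows' (s:Int)).foldl (fun cols jr =>
        (PySem.List.enumerate jr.2).foldl (fun cols ise =>
          PySem.List.pySetD cols ise.1 (PySem.List.pyGetD cols ise.1 [] ++ [(jr.1, ise.2)])) cols) L =
      L.mapIdx (fun n a => a ++ pvBucket rows' s n) := by
  induction rows' with
  | nil =>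
    intro s L
    rw [PySem.List.enumerate_nil, List.foldl_nil]
    apply List.ext_getElem (by simp)
    intro n h1 h2
    rw [List.getElem_mapIdx]
    simp [pvBucket]
  | cons r rs ih =>
    intro s L
    rw [PySem.List.enumerate_cons, List.foldl_cons]
    have h0 : (0:Int) = ((0:Nat):Int) := rfl
    have hinner := inner_cols (s:Int) r 0 L
    rw [show PySem.List.enumerate r = PySem.List.enumerate r ((0:Nat):Int) from rfl] at *
    rw [hinner]
    have hcast : (s:Int) + 1 = ((s+1:Nat):Int) := by push_cast; ring
    rw [hcast, ih (s+1)]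
    apply List.ext_getElem (by simp)
    intro n h1 h2
    rw [List.getElem_mapIdx, List.getElem_mapIdx, List.getElem_mapIdx]
    simp only [pvBucket]
    by_cases hn : n < r.length
    · rw [if_pos (by omega), if_pos hn]
      simp [List.append_assoc]
    · rw [if_neg (by omega), if_neg hn]
      simp

-- processing one column's bucket appends that column's piece to every row that has the column
lemma fold_bucket (nCol : Nat) (H : Int × String → String) :
    ∀ (rs : List (List String)) (s : Nat) (P : List (List String)),
    (pvBucket rs s nCol).foldl (fun P js =>
        PySem.List.pySetD P js.1 (PySem.List.pyGetD P js.1 [] ++ [H js])) P =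
      P.mapIdx (fun n a =>
        if s ≤ n ∧ n - s < rs.length ∧ nCol < (rs.getD (n-s) []).length
        then a ++ [H ((n:Int), (rs.getD (n-s) []).getD nCol "")] else a) := by
  intro rs
  induction rs with
  | nil =>
    intro s P
    simp only [pvBucket, List.foldl_nil]
    apply List.ext_getElem (by simp)
    intro n h1 h2
    rw [List.getElem_mapIdx, if_neg (by simp only [List.length_nil]; omega)]
  | cons r rs ih =>
    intro s P
    simp only [pvBucket]
    by_cases hc : nCol < r.length
    · rw [if_pos hc]
      simp only [List.singleton_append, List.foldl_cons]
      have hset : PySem.List.pySetD P (s:Int) (PySem.List.pyGetD P (s:Int) [] ++ [H ((s:Int), r.getD nCol "")]) =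
          P.set s (P.getD s [] ++ [H ((s:Int), r.getD nCol "")]) := by simp
      rw [hset, ih (s+1)]
      apply List.ext_getElem (by simp)
      intro n h1 h2
      rw [List.getElem_mapIdx, List.getElem_mapIdx, List.getElem_set]
      have hn : n < P.length := by simpa using h2
      by_cases hns : s = n
      · subst hns
        have hcond : s ≤ s ∧ s - s < (r :: rs).length ∧ nCol < ((r :: rs).getD (s-s) []).length := by
          refine ⟨le_refl s, by simp, ?_⟩
          simpa using hc
        rw [if_neg (by omega), if_pos hcond]
        simp [List.getD_eq_getElem?_getD, List.getElem?_eq_getElem hn]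
      · rw [if_neg hns]
        by_cases hin : s + 1 ≤ n ∧ n - (s+1) < rs.length ∧ nCol < (rs.getD (n-(s+1)) []).length
        · rw [if_pos hin]
          have hs : n - s = (n - (s+1)) + 1 := by omega
          rw [if_pos (by rw [hs]; exact ⟨by omega, by simpa [List.getD_cons_succ] using hin.2⟩), hs]
          simp
        · rw [if_neg hin]
          have hs : ¬ (s ≤ n ∧ n - s < (r :: rs).length ∧ nCol < ((r :: rs).getD (n-s) []).length) := by
            intro hpos
            apply hin
            have hs1 : s + 1 ≤ n := by omega
            have hs' : n - s = (n - (s+1)) + 1 := by omega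
            refine ⟨hs1, ?_, ?_⟩
            · have := hpos.2.1; simp only [List.length_cons] at this; omega
            · have := hpos.2.2; rw [hs', List.getD_cons_succ] at this; exact this
          rw [if_neg hs]
    · rw [if_neg hc]
      simp only [List.nil_append]
      rw [ih (s+1)]
      apply List.ext_getElem (by simp)
      intro n h1 h2
      rw [List.getElem_mapIdx, List.getElem_mapIdx]
      by_cases hns : s = n
      · subst hns
        rw [if_neg (by omega), if_neg (by intro hpos; exact hc (by simpa using hpos.2.2))]
      · by_cases hin : s + 1 ≤ n ∧ n - (s+1) < rs.length ∧ nCol < (rs.getD (n-(s+1)) []).length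
        · have hs : n - s = (n - (s+1)) + 1 := by omega
          rw [if_pos hin, if_pos (by rw [hs]; exact ⟨by omega, by simpa [List.getD_cons_succ] using hin.2⟩), hs]
          simp
        · rw [if_neg hin]
          have hs : ¬ (s ≤ n ∧ n - s < (r :: rs).length ∧ nCol < ((r :: rs).getD (n-s) []).length) := by
            intro hpos
            have hs1 : s + 1 ≤ n := by
              rcases Nat.lt_or_ge s n with h | h
              · omega
              · exfalso
                have : s = n := by omega
                subst this
                exact hc (by simpa using hpos.2.2)
            apply hin
            have hs' : n - s = (n - (s+1)) + 1 := by omega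
            refine ⟨hs1, ?_, ?_⟩
            · have := hpos.2.1; simp only [List.length_cons] at this; omega
            · have := hpos.2.2; rw [hs', List.getD_cons_succ] at this; exact this
          rw [if_neg hs]

-- a bucket's cell lengths are exactly the column's cell lengths
lemma bucket_map_len (nCol : Nat) : ∀ (rs : List (List String)) (s : Nat),
    (pvBucket rs s nCol).map (fun js => PySem.Str.len js.2) = pvColList rs (nCol:Int) := by
  intro rs
  induction rs with
  | nil => intro s; simp [pvBucket, pvColList]
  | cons r t ih =>
    intro s
    simp only [pvBucket, pvColList, List.filter_cons]
    by_cases hc : nCol < r.length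
    · rw [if_pos hc, if_pos (by simp only [PySem.List.len_eq, decide_eq_true_eq]; omega)]
      simp only [List.singleton_append, List.map_cons]
      rw [ih (s+1)]
      simp only [pvColList]
      congr 1
      rw [PySem.List.pyGet?_natCast, List.getD_eq_getElem?_getD]
    · rw [if_neg hc, if_neg (by simp only [PySem.List.len_eq, decide_eq_true_eq]; omega)]
      simp only [List.nil_append]
      rw [ih (s+1)]
      rfl

-- the whole column-major pass, column by column
lemma parts_char (rows : List (List String)) (padding : Int) : ∀ (N : Nat),
    (PySem.List.enumerate ((List.range N).map (fun n => pvBucket rows 0 n))).foldl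
        (pvColStep rows padding) (rows.map (fun _ => [])) =
      rows.map (fun row => (List.range (min N row.length)).map (fun m : Nat => pvG rows padding row ((m : Nat) : Int))) := by
  intro N
  induction N with
  | zero =>
    simp only [List.range_zero, List.map_nil, PySem.List.enumerate_nil, List.foldl_nil]
    apply List.map_congr_left
    intro row _
    simp
  | succ N ih =>
    rw [List.range_succ, List.map_append, PySem.List.enumerate_append, List.foldl_append, ih]
    simp only [List.map_cons, List.map_nil, List.length_map, List.length_range,
      PySem.List.enumerate_cons, PySem.List.enumerate_nil, List.foldl_cons, List.foldl_nil]
    have hstart : (0:Int) + (N:Int) = ((N:Nat):Int) := by omega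
    rw [hstart]
    simp only [pvColStep]
    rw [bucket_map_len N rows 0]
    rw [fold_bucket N _ rows 0]
    apply List.ext_getElem (by simp)
    intro n h1 h2
    rw [List.getElem_mapIdx]
    simp only [List.getElem_map]
    have hn : n < rows.length := by simpa using h2
    have hgetD : rows.getD (n-0) [] = rows[n] := by
      simp only [Nat.sub_zero]
      rw [List.getD_eq_getElem?_getD, List.getElem?_eq_getElem hn]
      rfl
    rw [hgetD]
    have hcell : (PySem.List.pyGet? rows[n] ((N:Nat):Int)).getD "" = rows[n].getD N "" := by
      rw [PySem.List.pyGet?_natCast, List.getD_eq_getElem?_getD]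
    by_cases hNr : N < rows[n].length
    · rw [if_pos ⟨by omega, by omega, hNr⟩]
      have hmin1 : min (N+1) rows[n].length = N + 1 := by omega
      have hmin0 : min N rows[n].length = N := by omega
      rw [hmin1, hmin0, List.range_succ, List.map_append]
      congr 1
      simp only [List.map_cons, List.map_nil]
      congr 1
      have hrn : PySem.List.pyGetD rows ((n:Nat):Int) [] = rows[n] := by
        rw [PySem.List.pyGetD_natCast, List.getD_eq_getElem?_getD, List.getElem?_eq_getElem hn]
        rfl
      rw [hrn]
      by_cases hlast : ((N:Nat):Int) = PySem.List.len rows[n] - 1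
      · rw [if_pos hlast]
        simp only [pvG]
        rw [if_neg (by simp only [PySem.List.len_eq] at hlast ⊢; omega), if_pos hlast, hcell]
      · rw [if_neg hlast]
        simp only [pvG, pvColW]
        rw [if_pos (by simp only [PySem.List.len_eq] at hlast ⊢; omega), hcell]
    · rw [if_neg (by intro h; exact hNr h.2.2)]
      have hmm : min (N+1) rows[n].length = min N rows[n].length := by omega
      rw [hmm]

lemma cols0_eq (rows : List (List String)) (v : Int) :
    (((PySem.List.pyRange 0 v 1).map (fun _ => ([] : List (Int × String)))).mapIdx
        (fun n a => a ++ pvBucket rows 0 n)) =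
      (List.range v.toNat).map (fun n => pvBucket rows 0 n) := by
  apply List.ext_getElem (by simp [PySem.List.length_pyRange_one])
  intro n h1 h2
  rw [List.getElem_mapIdx]
  simp [List.getElem_map]

-- the row's own pieces are A's pieces with the agreed widths
lemma cat_len_eq_pieces (rows : List (List String)) (padding : Int) (row : List String)
    (hr : row ∈ rows) :
    pvCat rows padding row (PySem.List.len row) =
      PySem.Str.join "" ((PySem.List.enumerate row).map (pvPieceA (pvDict rows) padding row)) := by
  unfold pvCat
  rw [PySem.List.enumerate_eq_map_pyRange row ""]
  simp only [List.map_map, PySem.List.len_eq]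
  apply congrArg
  apply List.map_congr_left
  intro i hi
  rw [PySem.List.mem_pyRange_one] at hi
  obtain ⟨j, rfl⟩ : ∃ j : Nat, i = (j:Int) := ⟨i.toNat, by omega⟩
  have hj : j < row.length := by omega
  have hget : PySem.List.pyGetD row (j:Int) "" = row[j] := by
    rw [PySem.List.pyGetD_natCast, List.getD_eq_getElem?_getD, List.getElem?_eq_getElem hj]
    rfl
  have hget' : (PySem.List.pyGet? row (j:Int)).getD "" = row[j] := by
    rw [PySem.List.pyGet?_natCast, List.getElem?_eq_getElem hj]
    rfl
  simp only [Function.comp_apply, pvG, pvPieceA, hget, hget', PySem.List.len_eq]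
  by_cases hlt : (j:Int) < (row.length:Int) - 1
  · rw [if_pos hlt, if_pos hlt, ← width_agree rows row hr j hj]
    unfold pyLjust
    rw [PySem.List.pyRepeat_singleton]
  · rw [if_neg hlt, if_neg hlt, if_pos (by omega : (j:Int) = (row.length:Int) - 1)]

lemma main_eq (rows : List (List String)) (padding : Int) :
    columnise rows padding = columnise_alt rows padding := by
  rw [columnise_eq, columnise_alt_eq,
    PySem.List.foldl_append_singleton_eq_map
      (fun row => (PySem.List.enumerate row).foldl (fun s ie => s ++ pvPieceA (pvDict rows) padding row ie) "") rows []]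
  simp only [List.nil_append]
  have houter := outer_cols rows 0 ((PySem.List.pyRange 0 (pvNcols rows) 1).map (fun _ => ([] : List (Int × String))))
  simp only [Nat.cast_zero] at houter
  rw [houter, cols0_eq rows (pvNcols rows), parts_char rows padding (pvNcols rows).toNat, List.map_map]
  apply List.map_congr_left
  intro row hrow
  rw [foldl_str_append]
  have hle : row.length ≤ (pvNcols rows).toNat := by
    have h1 := le_ncols rows row hrow
    simp only [PySem.List.len_eq] at h1
    omega
  simp only [Function.comp_apply]
  rw [Nat.min_eq_right hle]
  have hcat : (List.range row.length).map (fun m : Nat => pvG rows padding row ((m : Nat) : Int)) =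
      (PySem.List.pyRange 0 (PySem.List.len row) 1).map (pvG rows padding row) := by
    rw [PySem.List.pyRange_one, List.map_map]
    simp [PySem.List.len_eq]
  rw [hcat,
    show PySem.Str.join "" ((PySem.List.pyRange 0 (PySem.List.len row) 1).map (pvG rows padding row)) =
      pvCat rows padding row (PySem.List.len row) from rfl,
    cat_len_eq_pieces rows padding row hrow]
  apply String.toList_inj.mp
  simp

-- ===== VERDICT (by name: the statement is the Claim_ definition above) =====
theorem columnise_spec : Claim_equal_columnise := by
  intro rows padding _
  simp only [Spec_columnise]
  exact main_eq rows padding
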